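-- pv_equiv track=rewrite | github.com/Nesquick0/Adventofcode | 2020/06/06.py | runFirst
-- ===== SOURCE A (Python) =====
-- def runFirst(input):
--   forms = {}
--   sum = 0
--   for line in input:
--     line = line.strip()
--     if (not line):
--       sum += len(forms)
--       forms = {}
--     else:
--       for char in line:
--         forms[char] = 1
--   sum += len(forms)
--
--   return sum
-- ===== SOURCE B (Python) =====
-- def runFirst(input):
--   # Phase 1: split the lines into groups separated by blank (after strip) lines.
--   groups = []
--   cur = []
--   for line in input:
--     s = line.strip()
--     if s:
--       cur.append(s)
--     else:
--       groups.append(cur)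
--       cur = []
--   groups.append(cur)
--   # Phase 2: one set per group, sum the sizes.
--   return sum(len({c for s in g for c in s}) for g in groups)
-- ===== Notes on version B (the rewrite author's own statement) =====
-- stated objective: alternative
-- what changed: Replaces the one-pass reset-on-blank dict accumulator with a two-phase group-then-reduce: first split the stripped lines into blank-separated groups, then sum the size of one character set per group.
import Mathlib
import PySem

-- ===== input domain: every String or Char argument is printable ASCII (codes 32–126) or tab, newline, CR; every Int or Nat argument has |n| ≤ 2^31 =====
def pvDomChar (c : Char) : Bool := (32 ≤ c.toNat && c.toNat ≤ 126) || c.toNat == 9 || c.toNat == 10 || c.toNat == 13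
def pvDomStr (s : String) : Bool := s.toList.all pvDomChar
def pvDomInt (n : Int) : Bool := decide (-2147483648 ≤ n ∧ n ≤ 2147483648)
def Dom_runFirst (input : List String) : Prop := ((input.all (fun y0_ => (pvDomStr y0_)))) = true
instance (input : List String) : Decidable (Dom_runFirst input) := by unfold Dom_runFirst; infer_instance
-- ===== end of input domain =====

-- B replaces A's one-pass reset-on-blank dict accumulator with a two-phase
-- group-then-reduce (split into blank-separated groups, then sum set sizes); same cost.

-- ===== PORT A =====
-- one loop step of A: state (forms, sum)
def runFirstStepA (st : PySem.Dict Char Int × Int) (line : String) : PySem.Dict Char Int × Int :=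
  let line := PySem.Str.strip line
  if line.toList = [] then (PySem.Dict.empty, st.2 + (PySem.Dict.size st.1 : Int))
  else (line.toList.foldl (fun d c => d.insert c (1 : Int)) st.1, st.2)

def runFirst (input : List String) : Int :=
  let st := input.foldl runFirstStepA (PySem.Dict.empty, 0)
  st.2 + (PySem.Dict.size st.1 : Int)

-- ===== PORT B =====
-- phase 1 loop step: state (groups, cur)
def runFirstStepB (p : List (List String) × List String) (line : String) : List (List String) × List String :=
  let s := PySem.Str.strip line
  if s.toList = [] then (p.1 ++ [p.2], [])
  else (p.1, p.2 ++ [s])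

-- len of the set comprehension {c for s in g for c in s}
def groupCount (g : List String) : Int :=
  (PySem.Set.len (PySem.Set.ofList (g.flatMap String.toList)) : Int)

def runFirst_alt (input : List String) : Int :=
  let p := input.foldl runFirstStepB ([], [])
  ((p.1 ++ [p.2]).map groupCount).sum

-- ===== PRECONDITION & SPEC =====
def Spec_runFirst (input : List String) (out : Int) : Prop := out = runFirst_alt input
instance (input : List String) (out : Int) : Decidable (Spec_runFirst input out) := by unfold Spec_runFirst; infer_instance

-- ===== CLAIM (what is proved, stated in full; the proofs are below) =====
def Claim_equal_runFirst : Prop := ∀ (input : List String), Dom_runFirst input → Spec_runFirst input (runFirst input)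

-- ===== LEMMAS AND PROOFS =====

-- B's phase-1 fold only appends to the groups list: a starting prefix passes through.
lemma foldB_prefix (input : List String) (gs : List (List String)) (c : List String) :
    input.foldl runFirstStepB (gs, c) =
      (gs ++ (input.foldl runFirstStepB ([], c)).1, (input.foldl runFirstStepB ([], c)).2) := by
  induction input generalizing gs c with
  | nil => simp
  | cons line rest ih =>
    simp only [List.foldl_cons, runFirstStepB]
    by_cases h : (PySem.Str.strip line).toList = []
    · simp only [h, if_true]
      simp only [List.nil_append]
      rw [ih (gs ++ [c]) [], ih [c] []]
      simp
    · simp only [if_neg h]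
      exact ih gs (c ++ [PySem.Str.strip line])

lemma size_eq_groupCount (forms : PySem.Dict Char Int) (cur : List String)
    (h : forms.keys = PySem.Set.ofList (cur.flatMap String.toList)) :
    (PySem.Dict.size forms : Int) = groupCount cur := by
  have hs : PySem.Dict.size forms = forms.keys.length := by
    simp [PySem.Dict.size, PySem.Dict.keys]
  simp [groupCount, PySem.Set.len, hs, h]

-- main loop invariant: A's fold from (forms, s) computes s + sizes of the groups B will form,
-- provided forms holds exactly the distinct characters of the current group cur.
lemma main_loop (input : List String) (forms : PySem.Dict Char Int) (s : Int) (cur : List String)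
    (h : forms.keys = PySem.Set.ofList (cur.flatMap String.toList)) :
    (let st := input.foldl runFirstStepA (forms, s)
     st.2 + (PySem.Dict.size st.1 : Int)) =
    s + (let p := input.foldl runFirstStepB ([], cur)
         ((p.1 ++ [p.2]).map groupCount).sum) := by
  induction input generalizing forms s cur with
  | nil =>
    simp only [List.foldl_nil, List.map_append, List.map_cons, List.map_nil, List.sum_append,
      List.sum_cons, List.sum_nil]
    rw [size_eq_groupCount forms cur h]; ring
  | cons line rest ih =>
    simp only [List.foldl_cons, runFirstStepA, runFirstStepB]
    by_cases hb : (PySem.Str.strip line).toList = []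
    · simp only [hb, if_true]
      rw [ih PySem.Dict.empty (s + (PySem.Dict.size forms : Int)) [] (by simp [PySem.Set.ofList])]
      simp only [List.nil_append]
      rw [foldB_prefix rest [cur] []]
      rw [size_eq_groupCount forms cur h]
      simp; ring
    · simp only [if_neg hb]
      apply ih
      rw [PySem.Dict.keys_foldl_insert _ (fun _ _ => (1 : Int)) forms, h]
      have : (cur ++ [PySem.Str.strip line]).flatMap String.toList
          = cur.flatMap String.toList ++ (PySem.Str.strip line).toList := by simp
      rw [this]
      simp [PySem.Set.ofList, PySem.Set.update, List.foldl_append]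

-- ===== VERDICT (by name: the statement is the Claim_ definition above) =====
theorem runFirst_spec : Claim_equal_runFirst := by
  intro input _
  show runFirst input = runFirst_alt input
  have := main_loop input PySem.Dict.empty 0 [] (by simp [PySem.Set.ofList])
  simpa [runFirst, runFirst_alt] using this
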